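-- pv_equiv track=rewrite | github.com/gabriel-de-jesus/labadain-stemmer | src/labadain_stemmer_core.py | tetun_suffix_removal
-- ===== SOURCE A (Python) =====
-- from typing import List, Tuple
--
-- def tetun_suffix_removal(word: str, suffixes: List[str]) -> str:
--     """Remove a suffix from the given word if the remaining root length is greater than two."""
--     sorted_suffixes = sorted(suffixes, key=len, reverse=True)
--     for suffix in sorted_suffixes:
--         if word.endswith(suffix):
--             stemmed_word = word[:-len(suffix)]
--             # Remove the prefix if the length of the remaining word > 2
--             if len(stemmed_word) > 2:
--                 return stemmed_word
--
--     return word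
-- ===== SOURCE B (Python) =====
-- def tetun_suffix_removal(word, suffixes):
--     """Remove a suffix from the given word if the remaining root length is greater than two."""
--     n = len(word)
--     best = 0  # length of the longest suffix whose removal leaves a root longer than two
--     for s in suffixes:
--         L = len(s)
--         if L > best and L > 0 and n - L > 2 and word.endswith(s):
--             best = L
--     return word[:n - best] if best > 0 else word
-- ===== Notes on version B (the rewrite author's own statement) =====
-- stated objective: simpler
-- what changed: Drops the O(n log n) stable sort: a single pass over the suffix list keeps only the length of the longest qualifying suffix (endswith, nonempty, root longer than two) and slices once at the end; valid because the returned stem depends only on that maximal length.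
import Mathlib
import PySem

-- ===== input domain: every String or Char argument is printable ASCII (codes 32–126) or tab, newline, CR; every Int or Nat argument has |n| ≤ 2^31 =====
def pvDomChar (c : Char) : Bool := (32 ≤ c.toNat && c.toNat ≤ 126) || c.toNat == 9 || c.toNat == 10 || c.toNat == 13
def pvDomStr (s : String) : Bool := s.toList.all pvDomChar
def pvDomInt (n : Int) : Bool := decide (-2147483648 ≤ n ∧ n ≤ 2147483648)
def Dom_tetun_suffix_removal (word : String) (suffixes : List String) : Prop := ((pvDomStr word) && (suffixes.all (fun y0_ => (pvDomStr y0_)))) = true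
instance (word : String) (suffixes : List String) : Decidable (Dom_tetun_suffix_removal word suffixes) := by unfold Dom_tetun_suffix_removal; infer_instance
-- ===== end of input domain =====

-- B replaces A's sort-then-scan by a single pass keeping the longest qualifying suffix length (simpler; same return value, no mutation).

-- ===== PORT A =====
-- the 'for suffix in sorted_suffixes' loop with its early return
def pvLoopA (word : String) : List String → String
  | [] => word
  | s :: rest =>
    if PySem.Str.endswith word s = true then
      let stemmed := PySem.Str.slice word none (some (-(PySem.Str.len s)))
      if 2 < PySem.Str.len stemmed then stemmed else pvLoopA word rest
    else pvLoopA word rest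

def tetun_suffix_removal (word : String) (suffixes : List String) : String :=
  pvLoopA word (PySem.List.sorted suffixes (fun s => PySem.Str.len s) true)

-- ===== PORT B =====
-- one step of Source B's loop: keep the larger qualifying suffix length
def pvStepB (word : String) (b : Int) (s : String) : Int :=
  let L := PySem.Str.len s
  if b < L ∧ 0 < L ∧ 2 < PySem.Str.len word - L ∧ PySem.Str.endswith word s = true then L else b

def tetun_suffix_removal_alt (word : String) (suffixes : List String) : String :=
  let best := suffixes.foldl (pvStepB word) 0
  if 0 < best then PySem.Str.slice word none (some (PySem.Str.len word - best)) else word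

-- ===== PRECONDITION & SPEC =====
def Spec_tetun_suffix_removal (word : String) (suffixes : List String) (out : String) : Prop := out = tetun_suffix_removal_alt word suffixes
instance (word : String) (suffixes : List String) (out : String) : Decidable (Spec_tetun_suffix_removal word suffixes out) := by unfold Spec_tetun_suffix_removal; infer_instance

-- ===== CLAIM (what is proved, stated in full; the proofs are below) =====
def Claim_equal_tetun_suffix_removal : Prop := ∀ (word : String) (suffixes : List String), Dom_tetun_suffix_removal word suffixes → Spec_tetun_suffix_removal word suffixes (tetun_suffix_removal word suffixes)

-- ===== LEMMAS AND PROOFS =====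

-- a suffix "qualifies": nonempty, matches, and leaves a root longer than two
def pvQ (word s : String) : Bool :=
  decide (0 < PySem.Str.len s) && decide (2 < PySem.Str.len word - PySem.Str.len s)
    && PySem.Str.endswith word s

-- the maximal qualifying suffix length in a list (0 if none qualifies)
def pvM (word : String) (l : List String) : Int :=
  ((l.filter (pvQ word)).map (fun s => PySem.Str.len s)).foldl max 0

theorem pvQ_iff (word s : String) : pvQ word s = true ↔
    (0 < PySem.Str.len s ∧ 2 < PySem.Str.len word - PySem.Str.len s ∧ PySem.Str.endswith word s = true) := by
  simp only [pvQ, Bool.and_eq_true, decide_eq_true_eq]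
  tauto

theorem pvStepB_eq (word : String) (b : Int) (s : String) :
    pvStepB word b s = if pvQ word s then max b (PySem.Str.len s) else b := by
  simp only [pvStepB, pvQ_iff]
  split_ifs with h h' h''
  · omega
  · exact absurd ⟨h.2.1, h.2.2.1, h.2.2.2⟩ h'
  · have : ¬ b < PySem.Str.len s := fun hb => h ⟨hb, h''.1, h''.2.1, h''.2.2⟩
    omega
  · rfl

theorem pvFoldB (word : String) : ∀ (l : List String) (b : Int),
    l.foldl (pvStepB word) b = ((l.filter (pvQ word)).map (fun s => PySem.Str.len s)).foldl max b := by
  intro l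
  induction l with
  | nil => intro b; rfl
  | cons s t ih =>
    intro b
    by_cases h : pvQ word s = true <;>
      simp [List.foldl_cons, pvStepB_eq, h, ih]

theorem pvFoldl_max_const (b : Int) : ∀ (xs : List Int), (∀ x ∈ xs, x ≤ b) → xs.foldl max b = b := by
  intro xs
  induction xs with
  | nil => intro _; rfl
  | cons x t ih =>
    intro h
    have hx : x ≤ b := h x (by simp)
    simp [List.foldl_cons, max_eq_left hx]
    exact ih (fun y hy => h y (by simp [hy]))

theorem pvFoldl_max_perm {l l' : List Int} (h : l.Perm l') : ∀ b : Int, l.foldl max b = l'.foldl max b := by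
  induction h with
  | nil => intro b; rfl
  | cons x h ih => intro b; simp [List.foldl_cons, ih]
  | swap x y t =>
    intro b
    simp only [List.foldl_cons]
    rw [max_right_comm]
  | trans _ _ ih1 ih2 => intro b; rw [ih1, ih2]

-- Str.slice with a 'none' start is List.slice on the code points
theorem pvSliceToList (word : String) (b : Option Int) :
    (PySem.Str.slice word none b).toList = PySem.List.slice word.toList none b := by
  simp [pysem]

-- word[:-L] for 0 < L is take (n - L)
theorem pvSlicePos (word : String) (s : String) (h : 0 < s.toList.length) :
    (PySem.Str.slice word none (some (-(PySem.Str.len s)))).toList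
      = word.toList.take (word.toList.length - s.toList.length) := by
  rw [show PySem.Str.len s = ((s.toList.length : Nat) : Int) from rfl, pvSliceToList]
  exact PySem.List.slice_to_neg_natCast (xs := word.toList) (k := s.toList.length) h

theorem pvLenSlice (word : String) (s : String) (h0 : 0 < s.toList.length) :
    PySem.Str.len (PySem.Str.slice word none (some (-(PySem.Str.len s))))
      = ((word.toList.length - s.toList.length : Nat) : Int) := by
  rw [show PySem.Str.len (PySem.Str.slice word none (some (-(PySem.Str.len s))))
        = (((PySem.Str.slice word none (some (-(PySem.Str.len s)))).toList.length : Nat) : Int) from rfl]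
  rw [pvSlicePos word s h0]
  simp [List.length_take]

-- the negative slice bound of A equals the nonnegative slice bound used by B
theorem pvSliceEq (word : String) (s : String) (h0 : 0 < s.toList.length)
    (hle : s.toList.length ≤ word.toList.length) :
    PySem.Str.slice word none (some (-(PySem.Str.len s)))
      = PySem.Str.slice word none (some (PySem.Str.len word - PySem.Str.len s)) := by
  apply String.toList_inj.mp
  rw [pvSlicePos word s h0, pvSliceToList]
  rw [show PySem.Str.len s = ((s.toList.length : Nat) : Int) from rfl,
      show PySem.Str.len word = ((word.toList.length : Nat) : Int) from rfl]
  rw [PySem.List.slice_to (xs := word.toList)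
        (b := ((word.toList.length : Nat) : Int) - ((s.toList.length : Nat) : Int)) (by omega)]
  congr 1
  omega

theorem pvLoopA_spec (word : String) : ∀ (l : List String),
    l.Pairwise (fun a b => PySem.Str.len b ≤ PySem.Str.len a) →
    pvLoopA word l =
      if 0 < pvM word l then
        PySem.Str.slice word none (some (PySem.Str.len word - pvM word l))
      else word := by
  intro l
  induction l with
  | nil => intro _; simp [pvLoopA, pvM]
  | cons s t ih =>
    intro hp
    have hpt : t.Pairwise (fun a b => PySem.Str.len b ≤ PySem.Str.len a) := hp.of_cons
    have hhead : ∀ y ∈ t, PySem.Str.len y ≤ PySem.Str.len s := (List.pairwise_cons.mp hp).1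
    by_cases hq : pvQ word s = true
    · -- the head qualifies: A returns its stem; its length is the maximal qualifying length
      obtain ⟨h0, h2, he⟩ := (pvQ_iff word s).mp hq
      have h0' : 0 < s.toList.length := by
        have := h0
        rw [show PySem.Str.len s = ((s.toList.length : Nat) : Int) from rfl] at this
        omega
      have hle : s.toList.length ≤ word.toList.length := by
        have := h2
        rw [show PySem.Str.len s = ((s.toList.length : Nat) : Int) from rfl,
            show PySem.Str.len word = ((word.toList.length : Nat) : Int) from rfl] at this
        omega
      have hmax : pvM word (s :: t) = PySem.Str.len s := by
        have hall : ∀ x ∈ (t.filter (pvQ word)).map (fun s => PySem.Str.len s), x ≤ PySem.Str.len s := by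
          intro x hx
          rcases List.mem_map.mp hx with ⟨y, hy, rfl⟩
          exact hhead y (List.mem_of_mem_filter hy)
        simp only [pvM, List.filter_cons_of_pos hq, List.map_cons, List.foldl_cons,
          max_eq_right (le_of_lt h0)]
        exact pvFoldl_max_const _ _ hall
      have hgt : 2 < PySem.Str.len (PySem.Str.slice word none (some (-(PySem.Str.len s)))) := by
        rw [pvLenSlice word s h0']
        have := h2
        rw [show PySem.Str.len s = ((s.toList.length : Nat) : Int) from rfl,
            show PySem.Str.len word = ((word.toList.length : Nat) : Int) from rfl] at this
        omega
      simp only [pvLoopA, he, if_true]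
      rw [if_pos hgt, hmax, if_pos h0, pvSliceEq word s h0' hle]
    · -- the head does not qualify: A skips it
      have hskip : pvLoopA word (s :: t) = pvLoopA word t := by
        by_cases he : PySem.Str.endswith word s = true
        · have hno : ¬ 2 < PySem.Str.len (PySem.Str.slice word none (some (-(PySem.Str.len s)))) := by
            by_cases h0 : 0 < s.toList.length
            · have h2 : ¬ 2 < PySem.Str.len word - PySem.Str.len s := by
                intro hc
                have h0i : 0 < PySem.Str.len s := by
                  rw [show PySem.Str.len s = ((s.toList.length : Nat) : Int) from rfl]
                  omega
                exact hq ((pvQ_iff word s).mpr ⟨h0i, hc, he⟩)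
              rw [pvLenSlice word s h0]
              rw [show PySem.Str.len s = ((s.toList.length : Nat) : Int) from rfl,
                  show PySem.Str.len word = ((word.toList.length : Nat) : Int) from rfl] at h2
              omega
            · have hz : s.toList.length = 0 := by omega
              rw [show PySem.Str.len (PySem.Str.slice word none (some (-(PySem.Str.len s))))
                    = (((PySem.Str.slice word none (some (-(PySem.Str.len s)))).toList.length : Nat) : Int) from rfl]
              rw [pvSliceToList,
                  show PySem.Str.len s = ((s.toList.length : Nat) : Int) from rfl, hz]
              rw [show -(((0:Nat):Int)) = ((0:Nat):Int) by norm_num]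
              rw [PySem.List.slice_to (xs := word.toList) (b := ((0:Nat):Int)) (by omega)]
              simp
          simp only [pvLoopA, he, if_true]
          rw [if_neg hno]
        · simp only [pvLoopA]
          rw [if_neg he]
      have hm : pvM word (s :: t) = pvM word t := by
        have hq' : pvQ word s = false := by simpa using hq
        simp [pvM, hq']
      rw [hskip, hm, ih hpt]

theorem pvM_perm (word : String) {l l' : List String} (h : l.Perm l') :
    pvM word l = pvM word l' := by
  exact pvFoldl_max_perm ((h.filter (pvQ word)).map (fun s => PySem.Str.len s)) 0

-- ===== VERDICT (by name: the statement is the Claim_ definition above) =====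
theorem tetun_suffix_removal_spec : Claim_equal_tetun_suffix_removal := by
  intro word suffixes _
  unfold Spec_tetun_suffix_removal tetun_suffix_removal tetun_suffix_removal_alt
  have hperm : (PySem.List.sorted suffixes (fun s => PySem.Str.len s) true).Perm suffixes :=
    PySem.List.sorted_perm _ _ _
  rw [pvLoopA_spec word _ (PySem.List.sorted_pairwise_rev suffixes (fun s => PySem.Str.len s)),
      pvM_perm word hperm, pvFoldB word suffixes 0]
  rfl
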